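-- pv_equiv track=rewrite | github.com/wew226/agents | 4_langgraph/community_contributions/victor_conqueror/sidekick_tools.py | generate_hashtags
-- ===== SOURCE A (Python) =====
-- def generate_hashtags(topic: str) -> str:
--     """Generate relevant hashtags for a given topic or set of keywords. Pass the main topic or comma-separated keywords. Use this before finalizing social media posts."""
--     keywords = [k.strip().lower() for k in topic.replace(",", " ").split() if len(k.strip()) > 2]
--     seen = set()
--     hashtags = []
--     for kw in keywords:
--         tag = "#" + kw.replace(" ", "").replace("-", "").replace("_", "")
--         if tag not in seen:
--             seen.add(tag)
--             hashtags.append(tag)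
--     generic = ["#trending", "#viral", "#fyp", "#contentcreator", "#mustwatch"]
--     for g in generic:
--         if g not in seen:
--             hashtags.append(g)
--     return f"Generated hashtags ({len(hashtags)}):\n{' '.join(hashtags[:15])}"
-- ===== SOURCE B (Python) =====
-- def generate_hashtags(topic: str) -> str:
--     """Generate relevant hashtags for a given topic or set of keywords. Pass the main topic or comma-separated keywords. Use this before finalizing social media posts."""
--     keywords = [k.strip().lower() for k in topic.replace(",", " ").split() if len(k.strip()) > 2]
--     tags = ["#" + kw.replace(" ", "").replace("-", "").replace("_", "") for kw in keywords]
--     tags += ["#trending", "#viral", "#fyp", "#contentcreator", "#mustwatch"]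
--     hashtags = []
--     while tags:
--         head = tags[0]
--         hashtags.append(head)
--         tags = [t for t in tags[1:] if t != head]
--     return f"Generated hashtags ({len(hashtags)}):\n{' '.join(hashtags[:15])}"
-- ===== Notes on version B (the rewrite author's own statement) =====
-- stated objective: alternative
-- what changed: Replaces the seen-set bookkeeping with a set-free dedup: build all candidate tags plus the generic list up front, then repeatedly take the head and filter every later duplicate of it out of the remainder (Sieve-style first-occurrence dedup), no membership structure maintained.
import Mathlib
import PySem

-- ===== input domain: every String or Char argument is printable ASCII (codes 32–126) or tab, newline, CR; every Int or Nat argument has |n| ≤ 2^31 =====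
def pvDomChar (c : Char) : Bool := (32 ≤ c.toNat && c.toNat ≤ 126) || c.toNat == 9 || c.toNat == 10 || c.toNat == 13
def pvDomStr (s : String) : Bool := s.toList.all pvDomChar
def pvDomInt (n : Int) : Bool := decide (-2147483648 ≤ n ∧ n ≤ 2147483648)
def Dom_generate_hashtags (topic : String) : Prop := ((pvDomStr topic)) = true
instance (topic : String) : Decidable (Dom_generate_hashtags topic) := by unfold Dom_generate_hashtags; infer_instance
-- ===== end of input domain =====

-- B drops the seen-set entirely: it builds the full tag list and deduplicates by repeatedly
-- taking the head and filtering its later duplicates out of the remainder (alternative decomposition).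
-- ===== PORT A =====
def generate_hashtags (topic : String) : String :=
  let keywords := ((PySem.Str.split₀ (PySem.Str.replace topic "," " ")).filter
      (fun k => PySem.Str.len (PySem.Str.strip k) > 2)).map
      (fun k => PySem.Str.lower (PySem.Str.strip k))
  let st := keywords.foldl
      (fun (st : PySem.Set String × List String) kw =>
        let tag := "#" ++ PySem.Str.replace (PySem.Str.replace (PySem.Str.replace kw " " "") "-" "") "_" ""
        if tag ∈ st.1 then st else (PySem.Set.add st.1 tag, st.2 ++ [tag]))
      ((PySem.Set.empty : PySem.Set String), ([] : List String))
  let generic := ["#trending", "#viral", "#fyp", "#contentcreator", "#mustwatch"]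
  let hashtags := generic.foldl (fun hs g => if g ∈ st.1 then hs else hs ++ [g]) st.2
  "Generated hashtags (" ++ PySem.Int.toStr (hashtags.length : Int) ++ "):\n" ++
    PySem.Str.join " " (PySem.List.slice hashtags none (some 15))

-- ===== PORT B =====
-- B's while loop: take the head, filter its duplicates from the tail, recurse on what is left.
def dedupFilter : List String → List String
  | [] => []
  | h :: t => h :: dedupFilter (t.filter (fun x => x != h))
termination_by xs => xs.length
decreasing_by
  simp only [List.length_cons, List.length_unattach]
  exact Nat.lt_succ_of_le (le_trans (List.length_filter_le _ _) (by simp))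

def generate_hashtags_alt (topic : String) : String :=
  let keywords := ((PySem.Str.split₀ (PySem.Str.replace topic "," " ")).filter
      (fun k => PySem.Str.len (PySem.Str.strip k) > 2)).map
      (fun k => PySem.Str.lower (PySem.Str.strip k))
  let tags := keywords.map
      (fun kw => "#" ++ PySem.Str.replace (PySem.Str.replace (PySem.Str.replace kw " " "") "-" "") "_" "")
      ++ ["#trending", "#viral", "#fyp", "#contentcreator", "#mustwatch"]
  let hashtags := dedupFilter tags
  "Generated hashtags (" ++ PySem.Int.toStr (hashtags.length : Int) ++ "):\n" ++
    PySem.Str.join " " (PySem.List.slice hashtags none (some 15))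

-- ===== PRECONDITION & SPEC =====
def Spec_generate_hashtags (topic : String) (out : String) : Prop := out = generate_hashtags_alt topic
instance (topic : String) (out : String) : Decidable (Spec_generate_hashtags topic out) := by unfold Spec_generate_hashtags; infer_instance

-- ===== CLAIM (what is proved, stated in full; the proofs are below) =====
def Claim_equal_generate_hashtags : Prop := ∀ (topic : String), Dom_generate_hashtags topic → Spec_generate_hashtags topic (generate_hashtags topic)

-- ===== LEMMAS AND PROOFS =====

-- A's first loop, started with equal components, keeps them equal and computes Set.update.
theorem loop1_eq_update (f : String → String) (xs : List String) (s : PySem.Set String) :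
    xs.foldl (fun (st : PySem.Set String × List String) kw =>
        let tag := f kw
        if tag ∈ st.1 then st else (PySem.Set.add st.1 tag, st.2 ++ [tag])) (s, (s : List String))
      = (PySem.Set.update s (xs.map f), (PySem.Set.update s (xs.map f) : List String)) := by
  induction xs generalizing s with
  | nil => simp [PySem.Set.update]
  | cons x xs ih =>
      simp only [List.foldl_cons, List.map_cons, PySem.Set.update_cons]
      rw [← ih (PySem.Set.add s (f x))]
      by_cases h : f x ∈ s
      · simp [h]
      · simp [h]

-- A's second loop against a fixed set s appends the elements not in s.
theorem loop2_eq_filter (gs : List String) (s : PySem.Set String) (hs : List String) :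
    gs.foldl (fun hs g => if g ∈ s then hs else hs ++ [g]) hs
      = hs ++ gs.filter (fun g => !(PySem.Set.contains s g)) := by
  induction gs generalizing hs with
  | nil => simp
  | cons g gs ih =>
      simp only [List.foldl_cons, List.filter_cons, ih]
      by_cases h : g ∈ s
      · simp [h]
      · simp [h]

-- Adding an already-present element is absorbed: folding add over a list equals folding over
-- the list with all copies of that element filtered out.
theorem foldl_add_filter (t : List String) (s : PySem.Set String) (h : String) (hmem : h ∈ s) :
    t.foldl PySem.Set.add s = (t.filter (fun x => x != h)).foldl PySem.Set.add s := by
  induction t generalizing s with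
  | nil => rfl
  | cons x t ih =>
      by_cases hx : x = h
      · subst hx
        simp only [List.filter_cons, bne_self_eq_false, List.foldl_cons]
        rw [PySem.Set.add_of_mem hmem]; exact ih s hmem
      · simp only [List.filter_cons, bne_iff_ne, hx, ne_eq, not_false_eq_true,
          List.foldl_cons, if_pos]
        exact ih (PySem.Set.add s x) (by simp [PySem.Set.mem_add, hmem])

-- A fresh head element commutes out of the fold.
theorem foldl_add_cons (l : List String) (a : String) (s : PySem.Set String) (ha : a ∉ l) :
    l.foldl PySem.Set.add (a :: s) = a :: l.foldl PySem.Set.add s := by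
  induction l generalizing s with
  | nil => rfl
  | cons x l ih =>
      have hxa : x ≠ a := fun h => ha (h ▸ List.mem_cons_self ..)
      have : PySem.Set.add (a :: s) x = a :: PySem.Set.add s x := by
        simp [PySem.Set.add, PySem.Set.contains, hxa]
        split <;> rfl
      rw [List.foldl_cons, this, ih _ (fun h => ha (List.mem_cons_of_mem _ h)), List.foldl_cons]

-- B's filter-dedup computes the same first-occurrence dedup as dict.fromkeys / Set.ofList.
theorem dedupFilter_eq_ofList (xs : List String) : dedupFilter xs = PySem.Set.ofList xs := by
  induction hn : xs.length using Nat.strong_induction_on generalizing xs with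
  | _ n ih =>
    cases xs with
    | nil => simp [dedupFilter]
    | cons h t =>
        rw [dedupFilter]
        have hlen : (t.filter (fun x => x != h)).length < n := by
          subst hn
          exact Nat.lt_succ_of_le (List.length_filter_le _ _)
        rw [ih _ hlen _ rfl]
        have h1 : PySem.Set.ofList (h :: t) = t.foldl PySem.Set.add [h] := by
          simp [PySem.Set.ofList_eq_foldl, PySem.Set.add, PySem.Set.contains]
        rw [h1, foldl_add_filter t [h] h (by simp),
          foldl_add_cons _ h _ (by simp), PySem.Set.ofList_eq_foldl]

-- The whole hashtag-list computation of A equals B's filter-dedup of tags ++ generic.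
theorem hashlist_eq (f : String → String) (ks : List String) :
    List.foldl (fun hs g =>
        if g ∈ (List.foldl (fun (st : PySem.Set String × List String) kw =>
              if f kw ∈ st.1 then st else (st.1.add (f kw), st.2 ++ [f kw]))
            (PySem.Set.empty, []) ks).1
        then hs else hs ++ [g])
      (List.foldl (fun (st : PySem.Set String × List String) kw =>
            if f kw ∈ st.1 then st else (st.1.add (f kw), st.2 ++ [f kw]))
        (PySem.Set.empty, []) ks).2
      ["#trending", "#viral", "#fyp", "#contentcreator", "#mustwatch"]
    = dedupFilter (ks.map f ++ ["#trending", "#viral", "#fyp", "#contentcreator", "#mustwatch"]) := by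
  have h1 : List.foldl (fun (st : PySem.Set String × List String) kw =>
        if f kw ∈ st.1 then st else (st.1.add (f kw), st.2 ++ [f kw]))
      (PySem.Set.empty, ([] : List String)) ks
      = (PySem.Set.update PySem.Set.empty (ks.map f),
         (PySem.Set.update PySem.Set.empty (ks.map f) : List String)) :=
    loop1_eq_update f ks PySem.Set.empty
  have hgen : PySem.Set.ofList ["#trending", "#viral", "#fyp", "#contentcreator", "#mustwatch"]
      = ["#trending", "#viral", "#fyp", "#contentcreator", "#mustwatch"] :=
    PySem.Set.ofList_eq_self_of_nodup _ (by decide)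
  rw [h1, dedupFilter_eq_ofList, PySem.Set.update_empty, loop2_eq_filter,
    PySem.Set.ofList_append, PySem.Set.update_eq_append_filter, hgen]

theorem generate_hashtags_eq (topic : String) :
    generate_hashtags topic = generate_hashtags_alt topic := by
  unfold generate_hashtags generate_hashtags_alt
  simp only []
  rw [hashlist_eq (fun kw =>
    "#" ++ PySem.Str.replace (PySem.Str.replace (PySem.Str.replace kw " " "") "-" "") "_" "")]

-- ===== VERDICT (by name: the statement is the Claim_ definition above) =====
theorem generate_hashtags_spec : Claim_equal_generate_hashtags := by
  intro topic _
  exact generate_hashtags_eq topic
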